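-- pv_equiv track=rewrite | github.com/pipito-yukio/ubuntu_server_tools | src/development_pc/python/ServerTools/dao/ext_rir_ipv4_util.py | gen_like_ip_with_underscore
-- ===== SOURCE A (Python) =====
-- from typing import List, Optional
--
-- def gen_like_ip_with_underscore(like_ip: str) -> Optional[str]:
--     # 末尾の likeプレースホルダを削除する
--     raw_ip: str = like_ip.replace(".%", "")
--     fields: List[str] = raw_ip.split(".")
--     # コンマで区切って残りが1つなら終了
--     field_size: int = len(fields)
--     if field_size == 1:
--         return None
--
--     # 最後の項目が対象
--     last_part: str = fields[field_size - 1]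
--     last_size: int = len(last_part)
--     # 全てが1文字プレースホルダ('_')か
--     if last_part == '_' * last_size:
--         # フィールドの最後を削除
--         del fields[-1]
--         return ".".join(fields) + ".%"
--
--     # 文字列を逆順にする
--     s_reverse: str = last_part[::-1]
--     # 数値を1文字プレースホルダに置き換える
--     is_replaced: bool = False
--     s_replaced: str = ""
--     for i in range(last_size):
--         ch: str = s_reverse[i]
--         if not is_replaced and ch.isdigit():
--             # 後ろから最初に見つかった数字のみ置き換える
--             s_replaced = "_" + s_replaced
--             is_replaced = True
--         else:
--             # 置換済みなので先頭側の文字列を足し込む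
--             s_replaced = ch + s_replaced
--     # 置き換え対象フィールドの文字列を置き換える
--     fields[field_size - 1] = s_replaced
--     # 末尾にlikeプレースホルダ(".%")を付加して終了
--     return ".".join(fields) + ".%"
-- ===== SOURCE B (Python) =====
-- def gen_like_ip_with_underscore(like_ip):
--     fields = like_ip.replace(".%", "").split(".")
--     if len(fields) == 1:
--         return None
--     head = fields[:-1]
--     last = fields[-1]
--     if all(c == '_' for c in last):
--         return ".".join(head) + ".%"
--     # find the index of the rightmost digit in one forward pass
--     idx = None
--     i = 0
--     for c in last:
--         if c.isdigit():
--             idx = i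
--         i += 1
--     if idx is None:
--         new_last = last
--     else:
--         new_last = last[:idx] + "_" + last[idx + 1:]
--     return ".".join(head + [new_last]) + ".%"
-- ===== Notes on version B (the rewrite author's own statement) =====
-- stated objective: simpler
-- what changed: Instead of reversing the last field and rebuilding it character by character with a replaced-flag accumulator, B finds the index of the rightmost digit in one forward pass and splices an underscore in by slicing.
import Mathlib
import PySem

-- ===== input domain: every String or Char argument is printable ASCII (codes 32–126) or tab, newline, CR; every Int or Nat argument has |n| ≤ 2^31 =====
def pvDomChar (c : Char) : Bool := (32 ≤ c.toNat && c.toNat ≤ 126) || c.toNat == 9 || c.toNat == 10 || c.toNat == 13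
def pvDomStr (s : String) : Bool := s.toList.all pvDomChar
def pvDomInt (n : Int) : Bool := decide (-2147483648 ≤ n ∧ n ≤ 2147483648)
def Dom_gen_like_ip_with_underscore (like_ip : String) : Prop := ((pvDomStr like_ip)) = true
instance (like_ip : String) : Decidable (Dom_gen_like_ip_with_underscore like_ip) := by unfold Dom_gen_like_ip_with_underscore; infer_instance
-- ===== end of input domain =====

-- B replaces A's reversed char-by-char rebuild with a single forward pass that records the
-- rightmost digit's index and splices an underscore in by slicing (objective: simpler decomposition).


-- ===== PORT A =====
def gen_like_ip_with_underscore (like_ip : String) : Option String :=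
  let raw_ip : String := PySem.Str.replace like_ip ".%" ""
  let fields : List String := (PySem.Str.split? raw_ip ".").getD []
  let field_size : Nat := fields.length
  if field_size = 1 then none
  else
    let last_part : List Char := ((PySem.List.pyGet? fields ((field_size : Int) - 1)).getD "").toList
    let last_size : Nat := last_part.length
    if last_part = List.replicate last_size '_' then
      -- del fields[-1]; return ".".join(fields) + ".%"
      some (PySem.Str.join "." fields.dropLast ++ ".%")
    else
      let s_reverse : List Char := last_part.reverse
      let r : Bool × List Char := s_reverse.foldl
        (fun (st : Bool × List Char) ch =>
          if !st.1 && PySem.Chars.isdigit ch then (true, '_' :: st.2)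
          else (st.1, ch :: st.2)) (false, [])
      let fields2 : List String := fields.set (field_size - 1) (String.ofList r.2)
      some (PySem.Str.join "." fields2 ++ ".%")

-- ===== PORT B =====
def gen_like_ip_with_underscore_alt (like_ip : String) : Option String :=
  let fields : List String := (PySem.Str.split? (PySem.Str.replace like_ip ".%" "") ".").getD []
  if fields.length = 1 then none
  else
    let head : List String := fields.dropLast
    let last : List Char := ((PySem.List.pyGet? fields (-1)).getD "").toList
    if last.all (· == '_') then
      some (PySem.Str.join "." head ++ ".%")
    else
      let idx : Option Nat := (last.foldl
        (fun (st : Nat × Option Nat) c =>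
          (st.1 + 1, if PySem.Chars.isdigit c then some st.1 else st.2)) (0, none)).2
      let new_last : List Char :=
        match idx with
        | none => last
        | some i => last.take i ++ '_' :: last.drop (i + 1)
      some (PySem.Str.join "." (head ++ [String.ofList new_last]) ++ ".%")

-- ===== PRECONDITION & SPEC =====
def Spec_gen_like_ip_with_underscore (like_ip : String) (out : Option String) : Prop := out = gen_like_ip_with_underscore_alt like_ip
instance (like_ip : String) (out : Option String) : Decidable (Spec_gen_like_ip_with_underscore like_ip out) := by unfold Spec_gen_like_ip_with_underscore; infer_instance

-- ===== CLAIM (what is proved, stated in full; the proofs are below) =====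
def Claim_equal_gen_like_ip_with_underscore : Prop := ∀ (like_ip : String), Dom_gen_like_ip_with_underscore like_ip → Spec_gen_like_ip_with_underscore like_ip (gen_like_ip_with_underscore like_ip)

-- ===== LEMMAS AND PROOFS =====

/-- replace the LAST digit of a char list by '_' (spec both ports are reduced to). -/
def replLast : List Char → List Char
  | [] => []
  | c :: t =>
    if t.any PySem.Chars.isdigit then c :: replLast t
    else if PySem.Chars.isdigit c then '_' :: t else c :: t

/-- index of the last digit, if any. -/
def lastIdx : List Char → Option Nat
  | [] => none
  | c :: t =>
    match lastIdx t with
    | some j => some (j + 1)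
    | none => if PySem.Chars.isdigit c then some 0 else none

theorem lastIdx_none_iff (cs : List Char) :
    lastIdx cs = none ↔ cs.any PySem.Chars.isdigit = false := by
  induction cs with
  | nil => simp [lastIdx]
  | cons c t ih =>
    cases h : lastIdx t with
    | some j => simp [lastIdx, h] at ih ⊢; simp [ih]
    | none =>
      rw [h] at ih
      by_cases hd : PySem.Chars.isdigit c = true <;> simp [lastIdx, h, hd, ih.mp rfl]

theorem replLast_of_noDigit (cs : List Char) (h : cs.any PySem.Chars.isdigit = false) :
    replLast cs = cs := by
  cases cs with
  | nil => rfl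
  | cons c t =>
    simp only [List.any_cons, Bool.or_eq_false_iff] at h
    simp [replLast, h.1, h.2]

theorem foldA (cs : List Char) :
    cs.reverse.foldl
      (fun (st : Bool × List Char) ch =>
        if !st.1 && PySem.Chars.isdigit ch then (true, '_' :: st.2)
        else (st.1, ch :: st.2)) (false, []) =
    (cs.any PySem.Chars.isdigit, replLast cs) := by
  rw [List.foldl_reverse]
  induction cs with
  | nil => rfl
  | cons c t ih =>
    rw [List.foldr_cons, ih]
    by_cases ht : t.any PySem.Chars.isdigit = true
    · simp [replLast, ht]
    · simp only [Bool.not_eq_true] at ht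
      by_cases hd : PySem.Chars.isdigit c = true <;>
        simp [replLast, ht, hd, replLast_of_noDigit t ht]

theorem foldB (cs : List Char) (k : Nat) (acc : Option Nat) :
    cs.foldl
      (fun (st : Nat × Option Nat) c =>
        (st.1 + 1, if PySem.Chars.isdigit c then some st.1 else st.2)) (k, acc) =
    (k + cs.length,
      match lastIdx cs with
      | none => acc
      | some j => some (k + j)) := by
  induction cs generalizing k acc with
  | nil => simp [lastIdx]
  | cons c t ih =>
    rw [List.foldl_cons, ih]
    cases h : lastIdx t with
    | some j => simp [lastIdx, h, Nat.add_assoc, Nat.add_comm 1 j, Nat.add_comm 1 t.length]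
    | none =>
      by_cases hd : PySem.Chars.isdigit c = true <;>
        simp [lastIdx, h, hd, Nat.add_comm 1 t.length, Nat.add_assoc]

theorem splice_eq (cs : List Char) :
    replLast cs =
      (match lastIdx cs with
       | none => cs
       | some i => cs.take i ++ '_' :: cs.drop (i + 1)) := by
  induction cs with
  | nil => rfl
  | cons c t ih =>
    cases h : lastIdx t with
    | some j =>
      have ht : t.any PySem.Chars.isdigit = true := by
        by_contra hf
        simp only [Bool.not_eq_true] at hf
        rw [(lastIdx_none_iff t).mpr hf] at h; cases h
      rw [h] at ih
      simp [replLast, lastIdx, h, ht, ih]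
    | none =>
      have ht : t.any PySem.Chars.isdigit = false := (lastIdx_none_iff t).mp h
      by_cases hd : PySem.Chars.isdigit c = true <;>
        simp [replLast, lastIdx, h, ht, hd]

theorem set_last {α : Type} (xs : List α) (h : xs ≠ []) (x : α) :
    xs.set (xs.length - 1) x = xs.dropLast ++ [x] := by
  induction xs with
  | nil => exact absurd rfl h
  | cons a t ih =>
    cases t with
    | nil => rfl
    | cons b u =>
      have := ih (by simp)
      simp only [List.length_cons, Nat.add_sub_cancel] at this ⊢
      simp [List.set, List.dropLast]
      simpa using this

theorem pyGet_last (xs : List String) :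
    PySem.List.pyGet? xs ((xs.length : Int) - 1) = PySem.List.pyGet? xs (-1) := by
  cases xs with
  | nil => rfl
  | cons a t => simp [PySem.List.pyGet?, PySem.List.pyIdx?]

theorem underscore_iff (cs : List Char) :
    cs = List.replicate cs.length '_' ↔ cs.all (· == '_') = true := by
  rw [List.eq_replicate_length]
  simp

-- ===== VERDICT (by name: the statement is the Claim_ definition above) =====
set_option maxHeartbeats 1000000 in
theorem gen_like_ip_with_underscore_spec : Claim_equal_gen_like_ip_with_underscore := by
  intro like_ip _
  unfold Spec_gen_like_ip_with_underscore
  unfold gen_like_ip_with_underscore gen_like_ip_with_underscore_alt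
  simp only []
  generalize (PySem.Str.split? (PySem.Str.replace like_ip ".%" "") ".").getD [] = fields
  by_cases hlen : fields.length = 1
  · simp [hlen]
  · simp only [hlen, if_false]
    rw [pyGet_last fields]
    generalize hcs : ((PySem.List.pyGet? fields (-1)).getD "").toList = cs
    by_cases hu : cs = List.replicate cs.length '_'
    · rw [if_pos hu, if_pos ((underscore_iff cs).mp hu)]
    · rw [if_neg hu, if_neg (by rw [← underscore_iff cs]; exact hu)]
      have hne : fields ≠ [] := by
        intro hnil
        apply hu
        rw [← hcs, hnil]
        rfl
      rw [foldA, foldB, splice_eq]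
      rw [set_last fields hne]
      cases lastIdx cs <;> simp
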